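-- pv_equiv track=rewrite | github.com/LucasOJ/rosalind | chapter_3/problem_g.py | traverse_from_node
-- ===== SOURCE A (Python) =====
-- from typing import List, Dict
--
-- def traverse_from_node(adj_map: Dict[str, List[str]], start_node: str) -> List[str]:
--     traversal = []
--     stack = [start_node]
--     while len(stack) > 0:
--         # Get node at the top of the stack
--         current_node = stack[-1]
--
--         if current_node in adj_map:
--             neighbourhood = adj_map[current_node]
--             if len(neighbourhood) > 0:
--                 # If the current node has a neighbour left ...
--
--                 # ... remove the connecting edge from the graph ...
--                 neighbour = neighbourhood.pop()
--
--                 # and visit the neighbour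
--                 stack.append(neighbour)
--
--                 continue
--
--         # If the current node has no neighbours left
--         traversal.append(current_node)
--         stack.pop()
--
--     return traversal
-- ===== SOURCE B (Python) =====
-- from typing import List, Dict
--
-- def traverse_from_node(adj_map: Dict[str, List[str]], start_node: str) -> List[str]:
--     traversal = []
--
--     def visit(node):
--         while node in adj_map and len(adj_map[node]) > 0:
--             visit(adj_map[node].pop())
--         traversal.append(node)
--
--     visit(start_node)
--     return traversal
-- ===== Notes on version B (the rewrite author's own statement) =====
-- stated objective: alternative
-- what changed: Replaces A's explicit-stack while loop over (stack, traversal) with a recursive Hierholzer visit helper: visit(node) recursively consumes node's remaining edges and appends node after its loop, producing the same postorder sequence and the same destructive pops.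
import Mathlib
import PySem

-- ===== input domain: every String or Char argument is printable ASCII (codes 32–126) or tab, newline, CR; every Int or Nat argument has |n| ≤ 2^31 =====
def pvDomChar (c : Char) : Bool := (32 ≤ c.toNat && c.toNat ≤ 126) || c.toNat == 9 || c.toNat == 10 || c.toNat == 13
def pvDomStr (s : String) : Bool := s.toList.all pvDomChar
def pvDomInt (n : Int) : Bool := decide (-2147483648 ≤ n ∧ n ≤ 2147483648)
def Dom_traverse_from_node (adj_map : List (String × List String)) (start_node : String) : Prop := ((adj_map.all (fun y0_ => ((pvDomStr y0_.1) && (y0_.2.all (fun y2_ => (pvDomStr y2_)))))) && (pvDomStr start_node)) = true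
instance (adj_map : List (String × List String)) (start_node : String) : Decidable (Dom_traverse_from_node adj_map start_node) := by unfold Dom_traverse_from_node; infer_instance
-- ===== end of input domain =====

-- B replaces A's explicit stack loop by a recursive Hierholzer visit helper (same postorder
-- appends, same destructive edge consumption); equivalence is about the RETURN value — both
-- Pythons mutate adj_map identically (popping neighbour lists), which the ports thread as state.

-- Shared dict-access helpers (the Python dict adj_map: lookup = first match; neighbourhood.pop()
-- mutates the stored list, ported exactly as replacing the FIRST matching entry's value).
def pvLookup : List (String × List String) → String → Option (List String)
  | [], _ => none
  | (k, v) :: rest, key => if k = key then some v else pvLookup rest key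

def pvUpdate : List (String × List String) → String → List String → List (String × List String)
  | [], _, _ => []
  | (k, v) :: rest, key, nv => if k = key then (key, nv) :: rest else (k, v) :: pvUpdate rest key nv

-- total number of edges left in the adjacency map (termination measure)
def pvEdges (m : List (String × List String)) : Nat := (m.map (fun p => p.2.length)).sum

-- termination lemma for the ports (cited by decreasing_by / the fuel bound)
theorem pvEdges_pvUpdate (m : List (String × List String)) (k : String) (nb nv : List String)
    (h : pvLookup m k = some nb) : pvEdges (pvUpdate m k nv) + nb.length = pvEdges m + nv.length := by
  induction m with
  | nil => simp [pvLookup] at h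
  | cons p rest ih =>
    obtain ⟨pk, pv⟩ := p
    by_cases hk : pk = k
    · simp [pvLookup, hk] at h
      subst h
      simp [pvUpdate, hk, pvEdges]
      omega
    · simp [pvLookup, hk] at h
      have := ih h
      simp [pvUpdate, hk, pvEdges] at *
      omega

-- ===== PORT A =====
-- A's while loop over (adj_map, stack, traversal)
def pvLoopA (m : List (String × List String)) (stack trav : List String) : List String :=
  match stack with
  | [] => trav
  | cur :: rest =>
    match h : pvLookup m cur with
    | some nb =>
      if hnb : nb ≠ [] then
        -- neighbour = neighbourhood.pop(); stack.append(neighbour); continue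
        pvLoopA (pvUpdate m cur nb.dropLast) (nb.getLast hnb :: cur :: rest) trav
      else
        pvLoopA m rest (trav ++ [cur])
    | none => pvLoopA m rest (trav ++ [cur])
termination_by 2 * pvEdges m + stack.length
decreasing_by
  · have := pvEdges_pvUpdate m cur nb nb.dropLast h
    have hlen : nb.dropLast.length + 1 = nb.length := by
      have : nb.length ≠ 0 := by simpa [List.length_eq_zero_iff] using hnb
      simp [List.length_dropLast]; omega
    simp only [List.length_cons]; omega
  · simp only [List.length_cons]; omega
  · simp only [List.length_cons]; omega

def traverse_from_node (adj_map : List (String × List String)) (start_node : String) : List String :=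
  pvLoopA adj_map [start_node] []

-- ===== PORT B =====
-- the body of visit's while loop: returns (mutated map, nodes appended to traversal DURING the
-- loop); visit node = that loop followed by appending node itself. Fuel (one unit per consumed
-- edge) only makes the recursion total; pvEdges m + 1 is always enough (proved in the lemmas).
def pvVisitLoop : Nat → List (String × List String) → String → List (String × List String) × List String
  | 0, m, _ => (m, [])
  | f + 1, m, node =>
    match pvLookup m node with
    | some nb =>
      if h : nb ≠ [] then
        let r1 := pvVisitLoop f (pvUpdate m node nb.dropLast) (nb.getLast h)  -- visit(popped)'s loop
        let r2 := pvVisitLoop f r1.1 node                                     -- our while continues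
        (r2.1, r1.2 ++ [nb.getLast h] ++ r2.2)                                -- visit(popped) appends it
      else (m, [])
    | none => (m, [])

def traverse_from_node_alt (adj_map : List (String × List String)) (start_node : String) : List String :=
  (pvVisitLoop (pvEdges adj_map + 1) adj_map start_node).2 ++ [start_node]

-- ===== PRECONDITION & SPEC =====
def Spec_traverse_from_node (adj_map : List (String × List String)) (start_node : String) (out : List String) : Prop := out = traverse_from_node_alt adj_map start_node
instance (adj_map : List (String × List String)) (start_node : String) (out : List String) : Decidable (Spec_traverse_from_node adj_map start_node out) := by unfold Spec_traverse_from_node; infer_instance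

-- ===== CLAIM (what is proved, stated in full; the proofs are below) =====
def Claim_equal_traverse_from_node : Prop := ∀ (adj_map : List (String × List String)) (start_node : String), Dom_traverse_from_node adj_map start_node → Spec_traverse_from_node adj_map start_node (traverse_from_node adj_map start_node)

-- ===== LEMMAS AND PROOFS =====
-- Bridge: with enough fuel, one visit of `node` consumes exactly the edges it appends, and A's
-- loop from stack (node :: rest) is the visit of node followed by A's loop from rest.
theorem pvBridge (f : Nat) : ∀ (m : List (String × List String)) (node : String)
    (rest tr : List String), pvEdges m < f →
    pvEdges (pvVisitLoop f m node).1 + (pvVisitLoop f m node).2.length = pvEdges m ∧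
    pvLoopA m (node :: rest) tr
      = pvLoopA (pvVisitLoop f m node).1 rest (tr ++ (pvVisitLoop f m node).2 ++ [node]) := by
  induction f with
  | zero => intro m node rest tr hf; omega
  | succ f ih =>
    intro m node rest tr hf
    rcases hl : pvLookup m node with _ | nb
    · constructor
      · simp [pvVisitLoop, hl]
      · rw [pvLoopA]
        simp only [pvVisitLoop, hl]
        split <;> simp_all
    · by_cases hnb : nb = []
      · subst hnb
        constructor
        · simp [pvVisitLoop, hl]
        · rw [pvLoopA]
          simp only [pvVisitLoop, hl]
          split <;> simp_all
      · have hlen : nb.dropLast.length + 1 = nb.length := by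
          have : nb.length ≠ 0 := by simpa [List.length_eq_zero_iff] using hnb
          simp [List.length_dropLast]; omega
        have hm1 : pvEdges (pvUpdate m node nb.dropLast) + 1 = pvEdges m := by
          have := pvEdges_pvUpdate m node nb nb.dropLast hl
          omega
        have h1 := ih (pvUpdate m node nb.dropLast) (nb.getLast hnb) (node :: rest) tr (by omega)
        have h2 := ih (pvVisitLoop f (pvUpdate m node nb.dropLast) (nb.getLast hnb)).1 node rest
          (tr ++ (pvVisitLoop f (pvUpdate m node nb.dropLast) (nb.getLast hnb)).2
              ++ [nb.getLast hnb]) (by omega)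
        constructor
        · simp only [pvVisitLoop, hl, dif_pos hnb]
          simp only [List.length_append, List.length_cons, List.length_nil]
          omega
        · conv_rhs => rw [show pvVisitLoop (f+1) m node
            = ((pvVisitLoop f (pvVisitLoop f (pvUpdate m node nb.dropLast) (nb.getLast hnb)).1 node).1,
               (pvVisitLoop f (pvUpdate m node nb.dropLast) (nb.getLast hnb)).2
                 ++ [nb.getLast hnb]
                 ++ (pvVisitLoop f (pvVisitLoop f (pvUpdate m node nb.dropLast) (nb.getLast hnb)).1 node).2)
            from by simp [pvVisitLoop, hl, hnb]]
          rw [pvLoopA]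
          split <;> simp_all [List.append_assoc]

-- ===== VERDICT (by name: the statement is the Claim_ definition above) =====
theorem traverse_from_node_spec : Claim_equal_traverse_from_node := by
  intro adj_map start_node _
  unfold Spec_traverse_from_node traverse_from_node traverse_from_node_alt
  have h := pvBridge (pvEdges adj_map + 1) adj_map start_node [] [] (by omega)
  rw [h.2, pvLoopA]
  simp
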